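-- pv_equiv track=rewrite | github.com/souravdeogharia2005-jpg/insurance-app | insurance_scanner/emr_calculator.py | habits_emr_loading
-- ===== SOURCE A (Python) =====
-- def habits_emr_loading(habits):
--     """
--     habits: dict {habit_name: level_key}
--     level_key: 'occasionally' | 'regular_moderate' | 'regular_high' | None
--     Returns (total_emr_int, [breakdown_lines]).
--     """
--     LEVEL_EMR = {'occasionally': 5, 'regular_moderate': 10, 'regular_high': 15}
--     total, breakdown, active = 0, [], 0
--     for habit, level in (habits or {}).items():
--         pts = LEVEL_EMR.get(level or '', 0)
--         if pts:
--             active += 1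
--             total += pts
--             breakdown.append(f"{habit.title()} — {(level or '').replace('_', ' ')} → +{pts}")
--
--     if active == 2:
--         total += 20
--         breakdown.append("Co-existing risky habits (2) → +20")
--     elif active >= 3:
--         total += 40
--         breakdown.append(f"Co-existing risky habits ({active}) → +40")
--     return total, breakdown
-- ===== SOURCE B (Python) =====
-- LEVEL_EMR = {'occasionally': 5, 'regular_moderate': 10, 'regular_high': 15}
--
--
-- def habits_emr_loading(habits):
--     items = list((habits or {}).items())
--     levels = [level for _, level in items]
--     # one counting pass per level key; total is a closed-form weighted sum of the counts
--     counts = {k: levels.count(k) for k in LEVEL_EMR}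
--     active = sum(counts.values())
--     total = sum(p * counts[k] for k, p in LEVEL_EMR.items())
--     breakdown = [f"{habit.title()} — {level.replace('_', ' ')} → +{LEVEL_EMR[level]}"
--                  for habit, level in items if level in LEVEL_EMR]
--     if active == 2:
--         return total + 20, breakdown + ["Co-existing risky habits (2) → +20"]
--     if active >= 3:
--         return total + 40, breakdown + [f"Co-existing risky habits ({active}) → +40"]
--     return total, breakdown
-- ===== Notes on version B (the rewrite author's own statement) =====
-- stated objective: alternative
-- what changed: Instead of A's single pass accumulating a mutable (total, breakdown, active) triple per item, B counts each level key's occurrences over the list of levels (list.count per key), derives total as a closed-form weighted sum of those counts and active as their sum, and builds the breakdown in a separate filter-and-format pass.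
import Mathlib
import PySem

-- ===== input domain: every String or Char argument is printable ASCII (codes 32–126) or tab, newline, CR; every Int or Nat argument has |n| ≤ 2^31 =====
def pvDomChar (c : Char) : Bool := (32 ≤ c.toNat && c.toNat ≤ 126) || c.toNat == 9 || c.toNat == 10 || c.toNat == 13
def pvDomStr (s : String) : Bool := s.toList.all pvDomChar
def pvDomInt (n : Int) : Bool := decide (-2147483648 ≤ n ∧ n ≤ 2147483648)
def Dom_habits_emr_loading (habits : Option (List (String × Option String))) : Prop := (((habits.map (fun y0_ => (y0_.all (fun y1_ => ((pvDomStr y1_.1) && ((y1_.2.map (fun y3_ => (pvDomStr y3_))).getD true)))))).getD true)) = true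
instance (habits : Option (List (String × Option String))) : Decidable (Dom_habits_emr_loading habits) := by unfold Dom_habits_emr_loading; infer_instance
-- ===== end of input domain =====

-- B replaces A's single accumulating pass with per-level-key counting passes: total is a closed-form
-- weighted sum of the level counts, active their sum, and the breakdown a separate filter-and-format
-- pass (objective: alternative, same O(n) cost).

-- str.title(): a cased (here: ASCII letter) char is uppercased after a non-cased char, lowercased otherwise.
def pyTitleGo : Bool → List Char → List Char
  | _, [] => []
  | prev, c :: cs =>
    if c.isAlpha then (if prev then c.toLower else c.toUpper) :: pyTitleGo true cs
    else c :: pyTitleGo false cs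

def pyTitle (s : String) : String := String.ofList (pyTitleGo false s.toList)

def levelEMR : PySem.Dict String Int :=
  PySem.Dict.ofList [("occasionally", 5), ("regular_moderate", 10), ("regular_high", 15)]

-- ===== PORT A =====
def fmtLineA (h : String) (l : Option String) (p : Int) : String :=
  pyTitle h ++ " — " ++ PySem.Str.replace (l.getD "") "_" " " ++ " → +" ++ PySem.Int.toStr p

def habits_emr_loading (habits : Option (List (String × Option String))) : Int × List String :=
  let st := (habits.getD []).foldl
    (fun (st : Int × List String × Int) hl =>
      let pts := PySem.Dict.getD levelEMR (hl.2.getD "") 0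
      if pts ≠ 0 then (st.1 + pts, st.2.1 ++ [fmtLineA hl.1 hl.2 pts], st.2.2 + 1)
      else st)
    (0, [], 0)
  if st.2.2 == 2 then (st.1 + 20, st.2.1 ++ ["Co-existing risky habits (2) → +20"])
  else if st.2.2 ≥ 3 then
    (st.1 + 40, st.2.1 ++ ["Co-existing risky habits (" ++ PySem.Int.toStr st.2.2 ++ ") → +40"])
  else (st.1, st.2.1)

-- ===== PORT B =====
-- `level in LEVEL_EMR` (level may be None)
def memEMR (l : Option String) : Bool := (l.map (fun s => PySem.Dict.contains levelEMR s)).getD false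

-- the breakdown entry for an item that passed the membership filter
def fmtLineB (h : String) (l : Option String) : String :=
  pyTitle h ++ " — " ++ PySem.Str.replace ((l.getD "")) "_" " " ++ " → +"
    ++ PySem.Int.toStr (PySem.Dict.getD levelEMR (l.getD "") 0)

def habits_emr_loading_alt (habits : Option (List (String × Option String))) : Int × List String :=
  let items := habits.getD []
  let levels := items.map (fun hl => hl.2)
  -- counts = {k: levels.count(k) for k in LEVEL_EMR}; dict iteration order is the literal's
  let cOcc : Int := PySem.List.count levels (some "occasionally")
  let cMod : Int := PySem.List.count levels (some "regular_moderate")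
  let cHigh : Int := PySem.List.count levels (some "regular_high")
  let active := cOcc + cMod + cHigh
  let total := 5 * cOcc + 10 * cMod + 15 * cHigh
  let breakdown := (items.filter (fun hl => memEMR hl.2)).map (fun hl => fmtLineB hl.1 hl.2)
  if active == 2 then (total + 20, breakdown ++ ["Co-existing risky habits (2) → +20"])
  else if active ≥ 3 then
    (total + 40, breakdown ++ ["Co-existing risky habits (" ++ PySem.Int.toStr active ++ ") → +40"])
  else (total, breakdown)

-- ===== PRECONDITION & SPEC =====
def Spec_habits_emr_loading (habits : Option (List (String × Option String))) (out : Int × List String) : Prop := out = habits_emr_loading_alt habits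
instance (habits : Option (List (String × Option String))) (out : Int × List String) : Decidable (Spec_habits_emr_loading habits out) := by unfold Spec_habits_emr_loading; infer_instance

-- ===== CLAIM (what is proved, stated in full; the proofs are below) =====
def Claim_equal_habits_emr_loading : Prop := ∀ (habits : Option (List (String × Option String))), Dom_habits_emr_loading habits → Spec_habits_emr_loading habits (habits_emr_loading habits)

-- ===== LEMMAS AND PROOFS =====

-- every level value is one of the three keys (with its fixed points value) or dead (pts = 0, not a member)
theorem elem_cases (l : Option String) :
    l = some "occasionally" ∨ l = some "regular_moderate" ∨ l = some "regular_high" ∨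
      (PySem.Dict.getD levelEMR (l.getD "") 0 = 0 ∧ memEMR l = false) := by
  cases l with
  | none => right; right; right; decide
  | some s =>
    by_cases h1 : s = "occasionally"
    · exact Or.inl (by simp [h1])
    · by_cases h2 : s = "regular_moderate"
      · exact Or.inr (Or.inl (by simp [h2]))
      · by_cases h3 : s = "regular_high"
        · exact Or.inr (Or.inr (Or.inl (by simp [h3])))
        · refine Or.inr (Or.inr (Or.inr ?_))
          have hmk : levelEMR = PySem.Dict.mk
              [("occasionally", 5), ("regular_moderate", 10), ("regular_high", 15)] := by decide
          constructor
          · simp [hmk, PySem.Dict.getD, PySem.Dict.get?, Ne.symm h1, Ne.symm h2, Ne.symm h3]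
          · simp [memEMR, hmk, PySem.Dict.contains, Ne.symm h1, Ne.symm h2, Ne.symm h3]

-- invariant: A's fold from an arbitrary state = that state shifted by B's per-key counts and filtered lines
theorem fold_eq (l : List (String × Option String)) :
    ∀ (t : Int) (b : List String) (a : Int),
    l.foldl
      (fun (st : Int × List String × Int) hl =>
        let pts := PySem.Dict.getD levelEMR (hl.2.getD "") 0
        if pts ≠ 0 then (st.1 + pts, st.2.1 ++ [fmtLineA hl.1 hl.2 pts], st.2.2 + 1)
        else st)
      (t, b, a)
    = (t + (5 * (PySem.List.count (l.map (fun hl => hl.2)) (some "occasionally"))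
          + 10 * (PySem.List.count (l.map (fun hl => hl.2)) (some "regular_moderate"))
          + 15 * (PySem.List.count (l.map (fun hl => hl.2)) (some "regular_high"))),
       b ++ (l.filter (fun hl => memEMR hl.2)).map (fun hl => fmtLineB hl.1 hl.2),
       a + ((PySem.List.count (l.map (fun hl => hl.2)) (some "occasionally"))
          + (PySem.List.count (l.map (fun hl => hl.2)) (some "regular_moderate"))
          + (PySem.List.count (l.map (fun hl => hl.2)) (some "regular_high")))) := by
  induction l with
  | nil => intro t b a; simp [PySem.List.count]
  | cons hd tl ih =>
    obtain ⟨hn, hl⟩ := hd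
    intro t b a
    simp only [List.foldl_cons, List.map_cons, List.filter_cons]
    rcases elem_cases hl with h | h | h | ⟨hz, hm⟩
    · subst h
      have hfmt : fmtLineA hn (some "occasionally") 5 = fmtLineB hn (some "occasionally") := by
        simp only [fmtLineA, fmtLineB, Option.getD_some]
        rw [show PySem.Dict.getD levelEMR "occasionally" 0 = (5:Int) from by decide]
      simp only [Option.getD_some]
      rw [show PySem.Dict.getD levelEMR "occasionally" 0 = (5:Int) from by decide]
      rw [if_pos (by norm_num)]
      rw [ih]
      simp [PySem.List.count_eq, hfmt,
            show memEMR (some "occasionally") = true from by decide]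
      constructor <;> ring
    · subst h
      have hfmt : fmtLineA hn (some "regular_moderate") 10 = fmtLineB hn (some "regular_moderate") := by
        simp only [fmtLineA, fmtLineB, Option.getD_some]
        rw [show PySem.Dict.getD levelEMR "regular_moderate" 0 = (10:Int) from by decide]
      simp only [Option.getD_some]
      rw [show PySem.Dict.getD levelEMR "regular_moderate" 0 = (10:Int) from by decide]
      rw [if_pos (by norm_num)]
      rw [ih]
      simp [PySem.List.count_eq, hfmt,
            show memEMR (some "regular_moderate") = true from by decide]
      constructor <;> ring
    · subst h
      have hfmt : fmtLineA hn (some "regular_high") 15 = fmtLineB hn (some "regular_high") := by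
        simp only [fmtLineA, fmtLineB, Option.getD_some]
        rw [show PySem.Dict.getD levelEMR "regular_high" 0 = (15:Int) from by decide]
      simp only [Option.getD_some]
      rw [show PySem.Dict.getD levelEMR "regular_high" 0 = (15:Int) from by decide]
      rw [if_pos (by norm_num)]
      rw [ih]
      simp [PySem.List.count_eq, hfmt,
            show memEMR (some "regular_high") = true from by decide]
      constructor <;> ring
    · have hne : ¬ hl = some "occasionally" := by rintro hh; rw [hh] at hm; revert hm; decide
      have hne2 : ¬ hl = some "regular_moderate" := by rintro hh; rw [hh] at hm; revert hm; decide
      have hne3 : ¬ hl = some "regular_high" := by rintro hh; rw [hh] at hm; revert hm; decide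
      rw [if_neg (by simp [hz]), ih]
      simp [PySem.List.count_eq, hm, hne, hne2, hne3]

-- ===== VERDICT (by name: the statement is the Claim_ definition above) =====
theorem habits_emr_loading_spec : Claim_equal_habits_emr_loading := by
  intro habits _
  unfold Spec_habits_emr_loading habits_emr_loading habits_emr_loading_alt
  rw [fold_eq]
  norm_num
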